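-- pv_equiv track=rewrite | github.com/Y-o-Z/games | sudoku.py | get_indices_from_subgrid
-- ===== SOURCE A (Python) =====
-- def get_indices_from_subgrid(subgrid):
--     # 0-based
--     x = subgrid % 3
--     if subgrid < 3:
--         y = 0
--     elif subgrid < 6:
--         y = 1
--     else:
--         y = 2
--     indices = []
--     for row in range(3 * y, 3 * y + 3):
--         for column in range(3 * x, 3 * x + 3):
--             indices.append(row * 9 + column)
--     return indices
-- ===== SOURCE B (Python) =====
-- _OFFSETS = (0, 1, 2, 9, 10, 11, 18, 19, 20)
--
-- def get_indices_from_subgrid(subgrid):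
--     # 0-based; single corner + fixed 3x3 offset pattern instead of nested loops
--     x = subgrid % 3
--     if subgrid < 3:
--         y = 0
--     elif subgrid < 6:
--         y = 1
--     else:
--         y = 2
--     base = (3 * y) * 9 + 3 * x
--     return [base + d for d in _OFFSETS]
-- ===== Notes on version B (the rewrite author's own statement) =====
-- stated objective: simpler
-- what changed: Replaces the nested row/column range loops by computing one corner index and adding a fixed offset table in a single pass.
import Mathlib
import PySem

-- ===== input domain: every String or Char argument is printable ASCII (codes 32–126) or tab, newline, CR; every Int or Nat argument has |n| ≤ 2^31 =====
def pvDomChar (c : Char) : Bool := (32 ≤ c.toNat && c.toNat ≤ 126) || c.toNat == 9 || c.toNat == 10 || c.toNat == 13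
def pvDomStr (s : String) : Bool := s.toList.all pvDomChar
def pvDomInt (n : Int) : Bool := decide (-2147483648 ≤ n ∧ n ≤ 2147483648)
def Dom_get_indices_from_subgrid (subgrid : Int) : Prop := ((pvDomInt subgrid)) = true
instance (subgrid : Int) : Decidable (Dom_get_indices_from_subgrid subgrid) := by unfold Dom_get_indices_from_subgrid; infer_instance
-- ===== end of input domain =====

-- B replaces A's nested row/column loops by one corner index plus a fixed offset table (simpler decomposition; same behaviour, incl. Python %
-- and A's clamping of y).


-- ===== PORT A =====
def get_indices_from_subgrid (subgrid : Int) : List Int :=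
  let x := PySem.Int.mod subgrid 3
  let y : Int := if subgrid < 3 then 0 else if subgrid < 6 then 1 else 2
  (PySem.List.pyRange (3 * y) (3 * y + 3) 1).foldl (fun indices row =>
    (PySem.List.pyRange (3 * x) (3 * x + 3) 1).foldl (fun indices column =>
      indices ++ [row * 9 + column]) indices) []

-- ===== PORT B =====
-- offset pattern of a 3x3 block relative to its top-left corner
def pvOffsets : List Int := [0, 1, 2, 9, 10, 11, 18, 19, 20]

def get_indices_from_subgrid_alt (subgrid : Int) : List Int :=
  let x := PySem.Int.mod subgrid 3
  let y : Int := if subgrid < 3 then 0 else if subgrid < 6 then 1 else 2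
  let base := (3 * y) * 9 + 3 * x
  pvOffsets.map (fun d => base + d)

-- ===== PRECONDITION & SPEC =====
def Spec_get_indices_from_subgrid (subgrid : Int) (out : List Int) : Prop := out = get_indices_from_subgrid_alt subgrid
instance (subgrid : Int) (out : List Int) : Decidable (Spec_get_indices_from_subgrid subgrid out) := by unfold Spec_get_indices_from_subgrid; infer_instance

-- ===== CLAIM (what is proved, stated in full; the proofs are below) =====
def Claim_equal_get_indices_from_subgrid : Prop := ∀ (subgrid : Int), Dom_get_indices_from_subgrid subgrid → Spec_get_indices_from_subgrid subgrid (get_indices_from_subgrid subgrid)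

-- ===== LEMMAS AND PROOFS =====

-- ===== VERDICT (by name: the statement is the Claim_ definition above) =====
lemma mod3_cases (n : Int) : PySem.Int.mod n 3 = 0 ∨ PySem.Int.mod n 3 = 1 ∨ PySem.Int.mod n 3 = 2 := by
  have h1 := PySem.Int.mod_nonneg n (b := 3) (by norm_num)
  have h2 := PySem.Int.mod_lt n (b := 3) (by norm_num)
  omega

-- ===== VERDICT (by name: the statement is the Claim_ definition above) =====
theorem get_indices_from_subgrid_spec : Claim_equal_get_indices_from_subgrid := by
  intro subgrid _
  unfold Spec_get_indices_from_subgrid get_indices_from_subgrid get_indices_from_subgrid_alt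
  rcases mod3_cases subgrid with hx | hx | hx <;>
    rw [hx] <;> split_ifs <;> decide
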